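-- pv_equiv track=rewrite | github.com/thehalleyyoung/deppy | src/deppy/hybrid/anti_hallucination/checker.py | _detect_direct_contradiction
-- ===== SOURCE A (Python) =====
-- from typing import (
--     TYPE_CHECKING,
--     Any,
--     Callable,
--     Dict,
--     FrozenSet,
--     Iterable,
--     Iterator,
--     List,
--     Mapping,
--     Optional,
--     Protocol,
--     Sequence,
--     Set,
--     Tuple,
--     Union,
-- )
--
-- def _detect_direct_contradiction(
--     ca: List[str], cb: List[str]
-- ) -> Optional[str]:
--     """Heuristic: detect if any constraint in *ca* directly negates one in *cb*."""
--     _NEGATION_PAIRS = [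
--         ("must be non-null", "may be null"),
--         ("must be positive", "may be negative"),
--         ("must be non-empty", "may be empty"),
--         ("returns true", "returns false"),
--         ("is always", "is never"),
--         ("must not raise", "may raise"),
--         ("is immutable", "is mutable"),
--         ("is sorted", "is unsorted"),
--     ]
--     ca_lower = [c.lower() for c in ca]
--     cb_lower = [c.lower() for c in cb]
--     for pos, neg in _NEGATION_PAIRS:
--         a_has_pos = any(pos in c for c in ca_lower)
--         b_has_neg = any(neg in c for c in cb_lower)
--         a_has_neg = any(neg in c for c in ca_lower)
--         b_has_pos = any(pos in c for c in cb_lower)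
--         if (a_has_pos and b_has_neg) or (a_has_neg and b_has_pos):
--             return "Contradictory constraints: '" + pos + "' vs '" + neg + "'"
--     return None
-- ===== SOURCE B (Python) =====
-- _NEGATION_PAIRS = [
--     ("must be non-null", "may be null"),
--     ("must be positive", "may be negative"),
--     ("must be non-empty", "may be empty"),
--     ("returns true", "returns false"),
--     ("is always", "is never"),
--     ("must not raise", "may raise"),
--     ("is immutable", "is mutable"),
--     ("is sorted", "is unsorted"),
-- ]
--
-- _PHRASES = [p for pair in _NEGATION_PAIRS for p in pair]
--
--
-- def _present_phrases(constraints):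
--     """One pass over the constraints: the set of phrases occurring in some constraint."""
--     present = set()
--     for c in constraints:
--         cl = c.lower()
--         for p in _PHRASES:
--             if p in cl:
--                 present.add(p)
--     return present
--
--
-- def _detect_direct_contradiction(ca, cb):
--     present_a = _present_phrases(ca)
--     present_b = _present_phrases(cb)
--     for pos, neg in _NEGATION_PAIRS:
--         if (pos in present_a and neg in present_b) or (neg in present_a and pos in present_b):
--             return "Contradictory constraints: '" + pos + "' vs '" + neg + "'"
--     return None
-- ===== Notes on version B (the rewrite author's own statement) =====
-- stated objective: alternative
-- what changed: B inverts the loops: one pass over each constraint list builds a set of the phrases it contains, then the pair scan is a pure set-membership pass, instead of A's per-pair any() rescans of both lists.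
import Mathlib
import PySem

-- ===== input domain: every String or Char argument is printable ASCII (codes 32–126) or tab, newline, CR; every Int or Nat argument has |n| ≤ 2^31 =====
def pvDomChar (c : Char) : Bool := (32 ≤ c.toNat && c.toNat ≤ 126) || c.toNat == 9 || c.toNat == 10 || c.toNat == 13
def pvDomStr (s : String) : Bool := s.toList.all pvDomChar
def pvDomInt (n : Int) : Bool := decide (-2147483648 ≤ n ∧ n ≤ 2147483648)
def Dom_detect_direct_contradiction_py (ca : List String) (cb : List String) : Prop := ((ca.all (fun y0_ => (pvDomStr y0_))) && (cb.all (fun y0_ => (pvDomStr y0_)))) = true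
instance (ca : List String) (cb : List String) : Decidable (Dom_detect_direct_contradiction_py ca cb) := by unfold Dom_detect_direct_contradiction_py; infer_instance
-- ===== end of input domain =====

-- B builds, in one pass over each constraint list, the set of phrases occurring in it,
-- then scans the pairs by set membership only; A rescans both lists with any() for every pair.

-- ===== PORT A =====
def negationPairsA : List (String × String) :=
  [("must be non-null", "may be null"),
   ("must be positive", "may be negative"),
   ("must be non-empty", "may be empty"),
   ("returns true", "returns false"),
   ("is always", "is never"),
   ("must not raise", "may raise"),
   ("is immutable", "is mutable"),
   ("is sorted", "is unsorted")]

def loopA : List (String × String) → List String → List String → Option String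
  | [], _, _ => none
  | (pos, neg) :: rest, caL, cbL =>
    let a_has_pos := caL.any (fun c => PySem.Str.isIn pos c)
    let b_has_neg := cbL.any (fun c => PySem.Str.isIn neg c)
    let a_has_neg := caL.any (fun c => PySem.Str.isIn neg c)
    let b_has_pos := cbL.any (fun c => PySem.Str.isIn pos c)
    if (a_has_pos && b_has_neg) || (a_has_neg && b_has_pos) then
      some ("Contradictory constraints: '" ++ pos ++ "' vs '" ++ neg ++ "'")
    else loopA rest caL cbL

def detect_direct_contradiction_py (ca : List String) (cb : List String) : Option String :=
  let ca_lower := ca.map PySem.Str.lower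
  let cb_lower := cb.map PySem.Str.lower
  loopA negationPairsA ca_lower cb_lower

-- ===== PORT B =====
def negationPairsB : List (String × String) :=
  [("must be non-null", "may be null"),
   ("must be positive", "may be negative"),
   ("must be non-empty", "may be empty"),
   ("returns true", "returns false"),
   ("is always", "is never"),
   ("must not raise", "may raise"),
   ("is immutable", "is mutable"),
   ("is sorted", "is unsorted")]

def phrasesB : List String := negationPairsB.flatMap (fun pr => [pr.1, pr.2])

def presentPhrases (constraints : List String) : PySem.Set String :=
  constraints.foldl
    (fun present c =>
      let cl := PySem.Str.lower c
      phrasesB.foldl (fun present p => if PySem.Str.isIn p cl then PySem.Set.add present p else present) present)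
    PySem.Set.empty

def loopB : List (String × String) → PySem.Set String → PySem.Set String → Option String
  | [], _, _ => none
  | (pos, neg) :: rest, pa, pb =>
    if (PySem.Set.contains pa pos && PySem.Set.contains pb neg) ||
       (PySem.Set.contains pa neg && PySem.Set.contains pb pos) then
      some ("Contradictory constraints: '" ++ pos ++ "' vs '" ++ neg ++ "'")
    else loopB rest pa pb

def detect_direct_contradiction_py_alt (ca : List String) (cb : List String) : Option String :=
  let present_a := presentPhrases ca
  let present_b := presentPhrases cb
  loopB negationPairsB present_a present_b

-- ===== PRECONDITION & SPEC =====
def Spec_detect_direct_contradiction_py (ca : List String) (cb : List String) (out : Option String) : Prop := out = detect_direct_contradiction_py_alt ca cb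
instance (ca : List String) (cb : List String) (out : Option String) : Decidable (Spec_detect_direct_contradiction_py ca cb out) := by unfold Spec_detect_direct_contradiction_py; infer_instance

-- ===== CLAIM (what is proved, stated in full; the proofs are below) =====
def Claim_equal_detect_direct_contradiction_py : Prop := ∀ (ca : List String) (cb : List String), Dom_detect_direct_contradiction_py ca cb → Spec_detect_direct_contradiction_py ca cb (detect_direct_contradiction_py ca cb)

-- ===== LEMMAS AND PROOFS =====

-- inner fold over the phrase list: what the per-constraint pass adds to the set
lemma contains_inner_fold (ps : List String) (s : PySem.Set String) (cl p : String) :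
    PySem.Set.contains
      (ps.foldl (fun present q => if PySem.Str.isIn q cl then PySem.Set.add present q else present) s) p
    = (PySem.Set.contains s p || (decide (p ∈ ps) && PySem.Str.isIn p cl)) := by
  induction ps generalizing s with
  | nil => simp
  | cons q rest ih =>
    simp only [List.foldl_cons, ih, List.mem_cons]
    by_cases hq : q = p
    · subst hq
      split_ifs with hin
      · rw [PySem.Str.isIn_iff_infix] at hin
        simp [PySem.Set.contains, pysem, hin]
      · have hin' : PySem.Chars.isIn q.toList cl.toList = false := by
          cases hc : PySem.Chars.isIn q.toList cl.toList
          · rfl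
          · exact absurd hc hin
        simp [PySem.Set.contains, hin']
    · have hpq : p ≠ q := Ne.symm hq
      split_ifs with hin
      · simp [PySem.Set.contains, pysem, hpq]
      · simp [PySem.Set.contains, hpq]

-- B's presence set contains p iff p is a phrase occurring in some lowered constraint
lemma contains_presentPhrases (cs : List String) (p : String) :
    PySem.Set.contains (presentPhrases cs) p
    = (decide (p ∈ phrasesB) && cs.any (fun c => PySem.Str.isIn p (PySem.Str.lower c))) := by
  have gen : ∀ (s : PySem.Set String),
      PySem.Set.contains
        (cs.foldl (fun present c =>
          phrasesB.foldl (fun present q => if PySem.Str.isIn q (PySem.Str.lower c) then PySem.Set.add present q else present) present) s) p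
      = (PySem.Set.contains s p || (decide (p ∈ phrasesB) && cs.any (fun c => PySem.Str.isIn p (PySem.Str.lower c)))) := by
    induction cs with
    | nil => simp
    | cons c rest ih =>
      intro s
      simp only [List.foldl_cons, ih, contains_inner_fold, List.any_cons]
      cases PySem.Set.contains s p <;> cases hph : decide (p ∈ phrasesB) <;>
        cases PySem.Str.isIn p (PySem.Str.lower c) <;> simp
  have h := gen PySem.Set.empty
  simpa [presentPhrases, PySem.Set.empty, PySem.Set.contains] using h

lemma loops_agree (ca cb : List String) (prs : List (String × String))
    (h : ∀ pr ∈ prs, pr.1 ∈ phrasesB ∧ pr.2 ∈ phrasesB) :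
    loopA prs (ca.map PySem.Str.lower) (cb.map PySem.Str.lower)
      = loopB prs (presentPhrases ca) (presentPhrases cb) := by
  induction prs with
  | nil => rfl
  | cons pr rest ih =>
    obtain ⟨pos, neg⟩ := pr
    obtain ⟨h1, h2⟩ := h _ (List.mem_cons_self)
    have ihr := ih (fun pr hpr => h pr (List.mem_cons_of_mem _ hpr))
    simp only [loopA, loopB, contains_presentPhrases, h1, h2, decide_true, Bool.true_and,
      List.any_map, ihr]
    simp only [Function.comp_def]
    rfl

-- ===== VERDICT (by name: the statement is the Claim_ definition above) =====
theorem detect_direct_contradiction_py_spec : Claim_equal_detect_direct_contradiction_py := by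
  intro ca cb _
  show detect_direct_contradiction_py ca cb = detect_direct_contradiction_py_alt ca cb
  unfold detect_direct_contradiction_py detect_direct_contradiction_py_alt
  exact loops_agree ca cb negationPairsA (by decide)
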